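-- pv_equiv track=rewrite | github.com/ZRTMRH/polycube-solver | phase2/nn_solver.py | _allocate_piece_branch_quotas
-- ===== SOURCE A (Python) =====
-- def _allocate_piece_branch_quotas(n_options, total_cap):
--     """Allocate a per-piece placement budget across piece branches."""
--     if n_options <= 0:
--         return []
--     if total_cap is None:
--         return [None] * n_options
--
--     total_cap = max(1, int(total_cap))
--     n_options = min(n_options, total_cap)
--     base = total_cap // n_options
--     remainder = total_cap % n_options
--     return [
--         max(1, base + (1 if idx < remainder else 0))
--         for idx in range(n_options)
--     ]
-- ===== SOURCE B (Python) =====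
-- def _allocate_piece_branch_quotas(n_options, total_cap):
--     """Allocate a per-piece placement budget across piece branches."""
--     if n_options <= 0:
--         return []
--     if total_cap is None:
--         return [None] * n_options
--
--     remaining = max(1, int(total_cap))
--     slots = min(n_options, remaining)
--     quotas = []
--     while slots > 0:
--         q = -(-remaining // slots)  # ceil division: largest fair share of what is left
--         quotas.append(q)
--         remaining -= q
--         slots -= 1
--     return quotas
-- ===== Notes on version B (the rewrite author's own statement) =====
-- stated objective: alternative
-- what changed: Replaces the base/remainder arithmetic plus index comprehension by a greedy loop that repeatedly takes the ceiling share of the remaining budget over the remaining slots, so base, remainder and the per-index comparison disappear.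
-- outside the precondition, e.g. on _allocate_piece_branch_quotas(2, None): A returns [None, None], B returns [None, None]
import Mathlib
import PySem

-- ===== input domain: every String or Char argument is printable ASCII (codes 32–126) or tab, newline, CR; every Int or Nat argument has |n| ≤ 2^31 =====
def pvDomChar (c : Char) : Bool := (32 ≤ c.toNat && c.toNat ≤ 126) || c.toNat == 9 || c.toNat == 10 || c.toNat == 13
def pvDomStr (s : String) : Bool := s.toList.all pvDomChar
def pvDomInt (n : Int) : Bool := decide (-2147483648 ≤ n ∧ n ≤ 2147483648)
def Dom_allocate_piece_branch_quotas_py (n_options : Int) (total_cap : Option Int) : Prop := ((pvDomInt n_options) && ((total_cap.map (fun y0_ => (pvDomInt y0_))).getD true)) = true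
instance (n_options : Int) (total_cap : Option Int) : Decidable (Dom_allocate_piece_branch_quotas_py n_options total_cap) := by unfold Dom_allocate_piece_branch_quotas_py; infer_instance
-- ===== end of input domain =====

-- B replaces the base/remainder comprehension by a greedy loop taking the ceiling share of the
-- remaining budget over the remaining slots (alternative decomposition, same O(n) cost).


-- ===== PORT A =====
def allocate_piece_branch_quotas_py (n_options : Int) (total_cap : Option Int) : Option (List Int) :=
  if n_options ≤ 0 then some []
  else
    match total_cap with
    | none => none   -- Python returns [None] * n_options here: not a value of List Int; excluded by Pre_
    | some tc0 =>
      let total_cap := max 1 tc0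
      let n_options := min n_options total_cap
      let base := PySem.Int.floordiv total_cap n_options
      let remainder := PySem.Int.mod total_cap n_options
      some ((PySem.List.pyRange 0 n_options 1).map
        (fun idx => max 1 (base + (if idx < remainder then 1 else 0))))

-- ===== PORT B =====
-- the 'while slots > 0' loop of Source B: append ceil(remaining/slots), shrink both counters
def pvAltLoop (remaining slots : Int) : List Int :=
  if h : 0 < slots then
    let q := -(PySem.Int.floordiv (-remaining) slots)
    q :: pvAltLoop (remaining - q) (slots - 1)
  else []
termination_by slots.toNat
decreasing_by omega

def allocate_piece_branch_quotas_py_alt (n_options : Int) (total_cap : Option Int) : Option (List Int) :=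
  if n_options ≤ 0 then some []
  else
    match total_cap with
    | none => none   -- Source B returns [None] * n_options here: not a value of List Int; excluded by Pre_
    | some tc0 =>
      let remaining := max 1 tc0
      let slots := min n_options remaining
      some (pvAltLoop remaining slots)

-- ===== PRECONDITION & SPEC =====
-- Pre_ excludes inputs with n_options > 0 and total_cap = None, on which A returns [None] * n_options,
-- a list of Nones that is not a value of the declared return type List Int (B returns the same list there).
def Pre_allocate_piece_branch_quotas_py (n_options : Int) (total_cap : Option Int) : Prop :=
  n_options ≤ 0 ∨ total_cap ≠ none
instance (n_options : Int) (total_cap : Option Int) : Decidable (Pre_allocate_piece_branch_quotas_py n_options total_cap) := by unfold Pre_allocate_piece_branch_quotas_py; infer_instance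

def pvWitness_allocate_piece_branch_quotas_py : Int × Option Int := (5, some 13)

def Spec_allocate_piece_branch_quotas_py (n_options : Int) (total_cap : Option Int) (out : Option (List Int)) : Prop := out = allocate_piece_branch_quotas_py_alt n_options total_cap
instance (n_options : Int) (total_cap : Option Int) (out : Option (List Int)) : Decidable (Spec_allocate_piece_branch_quotas_py n_options total_cap out) := by unfold Spec_allocate_piece_branch_quotas_py; infer_instance

-- ===== CLAIM (what is proved, stated in full; the proofs are below) =====
def Claim_equal_allocate_piece_branch_quotas_py : Prop := ∀ (n_options : Int) (total_cap : Option Int), Dom_allocate_piece_branch_quotas_py n_options total_cap → Pre_allocate_piece_branch_quotas_py n_options total_cap → Spec_allocate_piece_branch_quotas_py n_options total_cap (allocate_piece_branch_quotas_py n_options total_cap)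

-- ===== LEMMAS AND PROOFS =====

-- the greedy ceiling loop produces exactly the front-loaded base/base+1 pattern
theorem pvAltLoop_eq (s : Nat) : ∀ R : Int, 0 < s → (s : Int) ≤ R →
    pvAltLoop R s = (List.range s).map
      (fun k : Nat => R / (s : Int) + if (k : Int) < R % (s : Int) then 1 else 0) := by
  induction s with
  | zero => intro R h; omega
  | succ s ih =>
    intro R _ hR
    set d : Int := ((s + 1 : Nat) : Int) with hd
    have hdpos : 0 < d := by simp [hd]
    have hsd : d = (s : Int) + 1 := by simp [hd]
    have hmod := Int.emod_nonneg R (by omega : d ≠ 0)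
    have hmlt := Int.emod_lt_of_pos R hdpos
    have hdiv := Int.mul_ediv_add_emod R d
    set b : Int := R / d with hb
    set r : Int := R % d with hr
    have hb1 : 1 ≤ b := by
      rcases Int.lt_or_le b 1 with h | h
      · nlinarith
      · exact h
    -- the first element of the loop
    have hq : -(PySem.Int.floordiv (-R) d) = b + (if 0 < r then 1 else 0) := by
      rw [PySem.Int.neg_floordiv_neg_eq_iff_of_pos hdpos]
      split_ifs with h0 <;> constructor <;> nlinarith
    rw [pvAltLoop]
    simp only [dif_pos hdpos, hq]
    rw [List.range_succ_eq_map, List.map_cons, List.map_map]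
    by_cases h0 : 0 < r
    · -- remainder positive: head is b+1, tail has base b, remainder r-1
      have hs0 : 0 < s := by
        rcases Nat.eq_zero_or_pos s with h | h
        · exfalso; subst h; simp [hd] at hmlt hmod hsd; omega
        · exact h
      have huniq := (Int.ediv_emod_unique (a := R - (b + 1)) (b := (s : Int))
        (q := b) (r := r - 1) (by exact_mod_cast hs0)).mpr
        (by refine ⟨by nlinarith, by omega, by omega⟩)
      have ihs := ih (R - (b + 1)) hs0 (by nlinarith)
      have hd1 : d - 1 = (s : Int) := by omega
      rw [if_pos h0, hd1, ihs, huniq.1, huniq.2]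
      congr 1
      · simp [h0]
      · apply List.map_congr_left
        intro k _
        simp only [Function.comp, Nat.succ_eq_add_one]
        push_cast
        have hiff : ((k : Int) + 1 < r) ↔ ((k : Int) < r - 1) := by omega
        rw [if_congr hiff rfl rfl]
    · -- remainder zero: every element is b
      have hr0 : r = 0 := by omega
      rcases Nat.eq_zero_or_pos s with hs | hs
      · subst hs
        have hnil : pvAltLoop (R - (b + 0)) (d - 1) = [] := by
          rw [pvAltLoop]
          have hne : ¬ 0 < d - 1 := by rw [hsd]; norm_num
          rw [dif_neg hne]
        rw [if_neg h0, hnil]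
        simp [hr0]
      · have huniq := (Int.ediv_emod_unique (a := R - b) (b := (s : Int))
          (q := b) (r := 0) (by exact_mod_cast hs)).mpr
          (by refine ⟨by nlinarith, by omega, by exact_mod_cast hs⟩)
        have ihs := ih (R - b) hs (by nlinarith)
        have hd1 : d - 1 = (s : Int) := by omega
        rw [if_neg h0]
        have hRb : R - (b + 0) = R - b := by ring
        rw [hRb, hd1, ihs, huniq.1, huniq.2]
        congr 1
        · simp [hr0]
        · apply List.map_congr_left
          intro k _
          simp only [Function.comp, Nat.succ_eq_add_one, hr0]
          push_cast
          omega

-- on the interesting branch, A's comprehension is the same pattern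
theorem pv_main (n_options : Int) (tc0 : Int) (hpos : 0 < n_options) :
    allocate_piece_branch_quotas_py n_options (some tc0)
      = allocate_piece_branch_quotas_py_alt n_options (some tc0) := by
  have h1 : ¬ n_options ≤ 0 := by omega
  simp only [allocate_piece_branch_quotas_py, allocate_piece_branch_quotas_py_alt, if_neg h1]
  set T : Int := max 1 tc0 with hT
  have hT1 : 1 ≤ T := le_max_left _ _
  set n : Int := min n_options T with hn
  have hn1 : 1 ≤ n := by omega
  have hnT : n ≤ T := min_le_right _ _
  have hnpos : 0 < n := by omega
  have hns : n = ((n.toNat : Nat) : Int) := by omega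
  have hloop := pvAltLoop_eq n.toNat T (by omega) (by omega)
  rw [hns]
  rw [hloop, PySem.List.pyRange_zero_natCast, List.map_map]
  congr 1
  apply List.map_congr_left
  intro k hk
  simp only [Function.comp]
  rw [PySem.Int.floordiv_eq_ediv_of_pos (by omega), PySem.Int.mod_eq_emod_of_pos (by omega)]
  have hbase : 1 ≤ T / ((n.toNat : Nat) : Int) := by
    rw [Int.le_ediv_iff_mul_le (by omega)]
    omega
  have hmod0 : 0 ≤ T % ((n.toNat : Nat) : Int) := Int.emod_nonneg T (by omega)
  split_ifs <;> omega

-- ===== VERDICT (by name: the statement is the Claim_ definition above) =====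
theorem allocate_piece_branch_quotas_py_spec : Claim_equal_allocate_piece_branch_quotas_py := by
  intro n_options total_cap _ hpre
  unfold Spec_allocate_piece_branch_quotas_py
  by_cases h1 : n_options ≤ 0
  · simp [allocate_piece_branch_quotas_py, allocate_piece_branch_quotas_py_alt, h1]
  · rcases total_cap with _ | tc0
    · rcases hpre with h | h
      · exact absurd h h1
      · exact absurd rfl h
    · exact pv_main n_options tc0 (by omega)
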